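-- pv_equiv track=rewrite | github.com/Xiuyuan7/Python-Code-Run-Test | 面经题测试/CodeSignal 题库/后两题/print_string_matrix_vertically.py | solution
-- ===== SOURCE A (Python) =====
-- def solution(arr):
--     rows = len(arr)
--     cols = 0
--     result = []
--
--     for s in arr:
--         cols = max(cols, len(s))
--
--     for j in range(cols):
--         for i in range(rows):
--             if j > len(arr[i]) - 1:
--                 continue
--             result.append(arr[i][j])
--
--     return "".join(result)
-- ===== SOURCE B (Python) =====
-- def solution(arr):
--     # Peel the matrix column by column: keep only the still-nonempty rows,
--     # emit their first characters, then continue with their tails.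
--     cells = [s for s in arr if s]
--     out = []
--     while cells:
--         out.append(''.join(s[0] for s in cells))
--         cells = [s[1:] for s in cells if len(s) > 1]
--     return ''.join(out)
-- ===== Notes on version B (the rewrite author's own statement) =====
-- stated objective: alternative
-- what changed: Replaces the max-length computation and the doubly-indexed bounds-checked loop by a column-peeling traversal: keep the still-nonempty rows, emit their heads, recurse on their tails; no index arithmetic remains.
import Mathlib
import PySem

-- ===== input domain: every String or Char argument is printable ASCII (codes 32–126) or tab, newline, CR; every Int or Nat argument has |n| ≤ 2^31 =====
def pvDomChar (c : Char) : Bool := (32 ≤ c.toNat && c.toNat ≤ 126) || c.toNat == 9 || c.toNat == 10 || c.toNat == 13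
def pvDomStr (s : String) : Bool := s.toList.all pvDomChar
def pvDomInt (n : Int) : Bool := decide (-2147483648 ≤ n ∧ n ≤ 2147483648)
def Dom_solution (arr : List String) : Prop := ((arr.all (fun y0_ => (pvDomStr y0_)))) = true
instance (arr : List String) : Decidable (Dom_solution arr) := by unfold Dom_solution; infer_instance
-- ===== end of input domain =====

-- B reads the matrix by peeling columns (heads of the still-nonempty rows) instead of
-- A's max-length bound with a doubly-indexed, bounds-checked loop; same return value, no speed claim.

-- ===== PORT A =====
def solution (arr : List String) : String :=
  let rows : Int := arr.length
  let cols : Int := arr.foldl (fun c s => max c (PySem.Str.len s)) 0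
  let result : List Char :=
    (PySem.List.pyRange 0 cols 1).foldl (fun res j =>
      (PySem.List.pyRange 0 rows 1).foldl (fun res i =>
        let s := PySem.List.pyGetD arr i ""   -- i ∈ [0, rows): always in range
        if j > PySem.Str.len s - 1 then res
        else match PySem.Str.pyGet? s j with  -- 0 ≤ j ≤ len-1: always some
          | some c => res ++ [c]
          | none => res) res) []
  String.ofList result

-- ===== PORT B =====
-- two facts cited by pvPeel's decreasing_by (termination of the while loop)
theorem pvAttach_map_filter {α β : Type} (l : List α) (p : α → Bool) (g : α → β) :
    List.map (fun x : {x // x ∈ l} => g ↑x) (List.filter (fun x => p ↑x) l.attach)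
      = List.map g (List.filter p l) := by
  simp [List.filter_attach, List.map_map, Function.comp_def]

theorem pvPeel_measure (cells : List (List Char)) :
    ((((cells.filter (fun s => 1 < s.length)).map (fun s => s.drop 1)).map List.length).sum
      + ((cells.filter (fun s => 1 < s.length)).map (fun s => s.drop 1)).length)
    ≤ (cells.map List.length).sum := by
  induction cells with
  | nil => simp
  | cons a t ih =>
    by_cases h : 1 < a.length
    · rw [List.filter_cons_of_pos (by simpa using h)]
      simp only [List.map_cons, List.sum_cons, List.length_cons, List.length_drop]
      omega
    · rw [List.filter_cons_of_neg (by simpa using h)]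
      simp only [List.map_cons, List.sum_cons]
      omega

-- the while loop of Source B: heads of the nonempty rows, then their tails
def pvPeel (cells : List (List Char)) : List Char :=
  if cells.isEmpty then []
  else (cells.map (fun s => s.headD ' ')) ++
       pvPeel ((cells.filter (fun s => 1 < s.length)).map (fun s => s.drop 1))
termination_by (cells.map List.length).sum + cells.length
decreasing_by
  have e1 := pvAttach_map_filter cells (fun s => decide (1 < s.length)) (fun s => s.drop 1)
  have h1 := pvPeel_measure cells
  have h2 : cells ≠ [] := by simpa [List.isEmpty_iff] using ‹¬cells.isEmpty = true›
  have h3 : 1 ≤ cells.length := List.length_pos_of_ne_nil h2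
  simp only [e1, List.map_map, Function.comp_def, List.length_map, List.length_drop] at h1 ⊢
  omega

def solution_alt (arr : List String) : String :=
  String.ofList (pvPeel ((arr.map String.toList).filter (fun s => !s.isEmpty)))

-- ===== PRECONDITION & SPEC =====
def Spec_solution (arr : List String) (out : String) : Prop := out = solution_alt arr
instance (arr : List String) (out : String) : Decidable (Spec_solution arr out) := by unfold Spec_solution; infer_instance

-- ===== CLAIM (what is proved, stated in full; the proofs are below) =====
def Claim_equal_solution : Prop := ∀ (arr : List String), Dom_solution arr → Spec_solution arr (solution arr)

-- ===== LEMMAS AND PROOFS =====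

-- common shape both programs are reduced to: the j-th column of the ragged char matrix,
-- and the widest row length
def pvMaxL (xs : List (List Char)) : Nat := (xs.map List.length).foldr max 0
def pvCol (j : Nat) (xs : List (List Char)) : List Char :=
  (xs.filter (fun s => decide (j < s.length))).map (fun s => s.getD j ' ')

theorem pvFlatMap_congr {α β : Type} (l : List α) (f g : α → List β)
    (h : ∀ a ∈ l, f a = g a) : l.flatMap f = l.flatMap g := by
  induction l with
  | nil => rfl
  | cons a t ih =>
    simp only [List.flatMap_cons, h a (by simp), ih (fun a ha => h a (by simp [ha]))]

theorem pvMaxL_filter_nonempty (xs : List (List Char)) :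
    pvMaxL (xs.filter (fun s => !s.isEmpty)) = pvMaxL xs := by
  induction xs with
  | nil => rfl
  | cons a t ih =>
    by_cases h : a.isEmpty
    · have ha : a.length = 0 := by simpa [List.isEmpty_iff, List.length_eq_zero_iff] using h
      rw [List.filter_cons_of_neg (by simp [h])]
      simp only [pvMaxL, List.map_cons, List.foldr_cons] at *
      omega
    · rw [List.filter_cons_of_pos (by simp [h])]
      simp only [pvMaxL, List.map_cons, List.foldr_cons] at *
      omega

theorem pvCol_filter_nonempty (j : Nat) (xs : List (List Char)) :
    pvCol j (xs.filter (fun s => !s.isEmpty)) = pvCol j xs := by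
  unfold pvCol
  rw [List.filter_filter]
  congr 1
  apply List.filter_congr
  intro s _
  by_cases h : j < s.length
  · have hne : ¬ s.isEmpty := by
      simp only [List.isEmpty_iff]
      intro hs; subst hs; simp at h
    simp [h, hne]
  · simp [h]

theorem pvMaxL_tails (xs : List (List Char)) :
    pvMaxL ((xs.filter (fun s => 1 < s.length)).map (fun s => s.drop 1)) = pvMaxL xs - 1 := by
  induction xs with
  | nil => rfl
  | cons a t ih =>
    by_cases h : 1 < a.length
    · rw [List.filter_cons_of_pos (by simpa using h)]
      simp only [pvMaxL, List.map_cons, List.foldr_cons, List.length_drop] at *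
      omega
    · rw [List.filter_cons_of_neg (by simpa using h)]
      simp only [pvMaxL, List.map_cons, List.foldr_cons] at *
      omega

theorem pvCol_tails (j : Nat) (xs : List (List Char)) :
    pvCol j ((xs.filter (fun s => 1 < s.length)).map (fun s => s.drop 1)) = pvCol (j + 1) xs := by
  unfold pvCol
  rw [List.filter_map, List.map_map, List.filter_filter]
  have hfil : xs.filter (fun a => ((fun s => decide (j < s.length)) ∘ fun s => s.drop 1) a
        && decide (1 < a.length)) = xs.filter (fun s => decide (j + 1 < s.length)) := by
    apply List.filter_congr
    intro s _
    by_cases h : j + 1 < s.length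
    · have h1 : j < s.length - 1 := by omega
      have h2 : 1 < s.length := by omega
      simp [h, h1, h2]
    · have h1 : ¬ j < s.length - 1 := by omega
      simp [h, h1]
  rw [hfil]
  apply List.map_congr_left
  intro s _
  simp [List.getD]

theorem pvCol_zero (xs : List (List Char)) (h : ∀ s ∈ xs, s ≠ []) :
    pvCol 0 xs = xs.map (fun s => s.headD ' ') := by
  unfold pvCol
  rw [List.filter_eq_self.mpr]
  · apply List.map_congr_left
    intro s _
    cases s <;> simp [List.getD]
  · intro s hs
    have := h s hs
    simpa [← List.length_pos_iff] using List.length_pos_of_ne_nil this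

theorem pvPeel_eq (n : Nat) : ∀ xs : List (List Char), pvMaxL xs = n → (∀ s ∈ xs, s ≠ []) →
    pvPeel xs = (List.range n).flatMap (fun j => pvCol j xs) := by
  induction n with
  | zero =>
    intro xs hm hne
    have hnil : xs = [] := by
      cases xs with
      | nil => rfl
      | cons a t =>
        exfalso
        have ha := List.length_pos_of_ne_nil (hne a (by simp))
        simp only [pvMaxL, List.map_cons, List.foldr_cons] at hm
        omega
    subst hnil
    simp [pvPeel]
  | succ n ih =>
    intro xs hm hne
    have hxs : ¬ xs.isEmpty = true := by
      intro h
      have : xs = [] := by simpa [List.isEmpty_iff] using h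
      subst this
      simp [pvMaxL] at hm
    rw [pvPeel, if_neg hxs]
    have hyne : ∀ s ∈ (xs.filter (fun s => 1 < s.length)).map (fun s => s.drop 1), s ≠ [] := by
      intro s hs
      simp only [List.mem_map, List.mem_filter] at hs
      obtain ⟨t, ⟨_, ht⟩, rfl⟩ := hs
      have : 1 < t.length := by simpa using ht
      have : 0 < (t.drop 1).length := by simp; omega
      exact List.ne_nil_of_length_pos this
    have hym : pvMaxL ((xs.filter (fun s => 1 < s.length)).map (fun s => s.drop 1)) = n := by
      rw [pvMaxL_tails, hm]
      omega
    rw [ih _ hym hyne]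
    rw [List.range_succ_eq_map, List.flatMap_cons, List.flatMap_map]
    congr 1
    · exact (pvCol_zero xs hne).symm
    · apply pvFlatMap_congr
      intro j _
      exact pvCol_tails j xs

-- A-side: the running max over the rows is pvMaxL
theorem pvColsRun (l : List String) (c : Int) (hc : 0 ≤ c) :
    l.foldl (fun c s => max c (PySem.Str.len s)) c = max c (pvMaxL (l.map String.toList) : Int) := by
  induction l generalizing c with
  | nil => simp [pvMaxL]; omega
  | cons a t ih =>
    simp only [List.foldl_cons]
    rw [ih (max c (PySem.Str.len a)) (by rw [PySem.Str.len_eq]; positivity)]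
    simp only [pvMaxL, List.map_cons, List.foldr_cons]
    rw [PySem.Str.len_eq]
    push_cast
    omega

-- A's inner loop over the rows, at column k, appends exactly pvCol k
theorem pvInner (arr : List String) (k : Nat) (res : List Char) :
    (PySem.List.pyRange 0 (arr.length : Int) 1).foldl (fun res i =>
        if (k : Int) > PySem.Str.len (PySem.List.pyGetD arr i "") - 1 then res
        else match PySem.Str.pyGet? (PySem.List.pyGetD arr i "") (k : Int) with
          | some c => res ++ [c]
          | none => res) res
      = res ++ pvCol k (arr.map String.toList) := by
  rw [PySem.List.foldl_pyRange_zero_pyGetD' arr "" (fun res s =>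
        if (k : Int) > PySem.Str.len s - 1 then res
        else match PySem.Str.pyGet? s (k : Int) with
          | some c => res ++ [c]
          | none => res) res]
  have hcongr : ∀ (acc : List Char), ∀ s ∈ arr,
      (if (k : Int) > PySem.Str.len s - 1 then acc
        else match PySem.Str.pyGet? s (k : Int) with
          | some c => acc ++ [c]
          | none => acc)
      = (if decide (k < s.toList.length) = true
            then acc ++ [s.toList.getD k ' '] else acc) := by
    intro acc s _
    rw [PySem.Str.len_eq, PySem.Str.pyGet?_natCast]
    by_cases h : k < s.toList.length
    · have h1 : ¬ ((k : Int) > (s.toList.length : Int) - 1) := by omega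
      have h' : k < s.length := by simpa using h
      rw [if_neg h1, List.getElem?_eq_getElem h]
      simp [h', List.getD]
    · have h1 : (k : Int) > (s.toList.length : Int) - 1 := by omega
      have h2 : ¬ k < s.length := by simpa using h
      simp [h2, Nat.not_lt.mp h2]
  rw [PySem.List.foldl_congr_mem arr
      (fun res s => if (k : Int) > PySem.Str.len s - 1 then res
        else match PySem.Str.pyGet? s (k : Int) with
          | some c => res ++ [c]
          | none => res)
      (fun acc s => if decide (k < s.toList.length) = true
          then acc ++ [s.toList.getD k ' '] else acc)
      res hcongr]
  rw [PySem.List.foldl_append_if]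
  unfold pvCol
  rw [List.filter_map, List.map_map]
  rfl

-- A computes the concatenation of the columns 0 .. maxL-1
theorem pvA_eq (arr : List String) :
    solution arr = String.ofList
      ((List.range (pvMaxL (arr.map String.toList))).flatMap
        (fun j => pvCol j (arr.map String.toList))) := by
  simp only [solution]
  rw [pvColsRun arr 0 le_rfl]
  rw [max_eq_right (by positivity)]
  rw [PySem.List.pyRange_zero_natCast (pvMaxL (arr.map String.toList))]
  rw [List.foldl_map]
  have houter : ∀ (acc : List Char), ∀ k ∈ List.range (pvMaxL (arr.map String.toList)),
      (PySem.List.pyRange 0 (arr.length : Int) 1).foldl (fun res i =>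
          if ((k : Nat) : Int) > PySem.Str.len (PySem.List.pyGetD arr i "") - 1 then res
          else match PySem.Str.pyGet? (PySem.List.pyGetD arr i "") ((k : Nat) : Int) with
            | some c => res ++ [c]
            | none => res) acc
        = acc ++ pvCol k (arr.map String.toList) := by
    intro acc k _
    exact pvInner arr k acc
  rw [PySem.List.foldl_congr_mem (List.range (pvMaxL (arr.map String.toList)))
      (fun res (k : Nat) => (PySem.List.pyRange 0 (arr.length : Int) 1).foldl (fun res i =>
          if ((k : Nat) : Int) > PySem.Str.len (PySem.List.pyGetD arr i "") - 1 then res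
          else match PySem.Str.pyGet? (PySem.List.pyGetD arr i "") ((k : Nat) : Int) with
            | some c => res ++ [c]
            | none => res) res)
      (fun acc (k : Nat) => acc ++ pvCol k (arr.map String.toList))
      [] houter]
  rw [PySem.List.foldl_append_eq_flatMap (fun k => pvCol k (arr.map String.toList))]
  rfl

-- B computes the same concatenation
theorem pvB_eq (arr : List String) :
    solution_alt arr = String.ofList
      ((List.range (pvMaxL (arr.map String.toList))).flatMap
        (fun j => pvCol j (arr.map String.toList))) := by
  unfold solution_alt
  have hne : ∀ s ∈ (arr.map String.toList).filter (fun s => !s.isEmpty), s ≠ [] := by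
    intro s hs h
    subst h
    simp at hs
  rw [pvPeel_eq (pvMaxL ((arr.map String.toList).filter (fun s => !s.isEmpty))) _ rfl hne]
  rw [pvMaxL_filter_nonempty]
  congr 1
  apply pvFlatMap_congr
  intro j _
  exact pvCol_filter_nonempty j (arr.map String.toList)

-- ===== VERDICT (by name: the statement is the Claim_ definition above) =====
theorem solution_spec : Claim_equal_solution := by
  intro arr _
  unfold Spec_solution
  rw [pvA_eq, pvB_eq]
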